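-- pv_equiv track=rewrite | github.com/bhuba1/indadown | indadown.py | changeEpisode
-- ===== SOURCE A (Python) =====
-- def changeEpisode(before, nextEpisode):
--     nextEpisode = list(nextEpisode)[::-1]
--     for i in range(len(before)):
--         if before[i].isnumeric():
--             listed = list(before)
--             listed[i] = nextEpisode.pop()
--             before = "".join(listed)
--
--     return before
-- ===== SOURCE B (Python) =====
-- def changeEpisode(before, nextEpisode):
--     # One pass: stream replacement characters from an iterator instead of
--     # repeatedly rebuilding the string.
--     it = iter(nextEpisode)
--     return ''.join(next(it) if c.isnumeric() else c for c in before)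
-- ===== Notes on version B (the rewrite author's own statement) =====
-- stated objective: idiomatic
-- what changed: A rebuilds the whole string (list/assign/join) once per numeric character after reversing nextEpisode and popping; B makes a single pass with an iterator over nextEpisode and joins once.
import Mathlib
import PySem

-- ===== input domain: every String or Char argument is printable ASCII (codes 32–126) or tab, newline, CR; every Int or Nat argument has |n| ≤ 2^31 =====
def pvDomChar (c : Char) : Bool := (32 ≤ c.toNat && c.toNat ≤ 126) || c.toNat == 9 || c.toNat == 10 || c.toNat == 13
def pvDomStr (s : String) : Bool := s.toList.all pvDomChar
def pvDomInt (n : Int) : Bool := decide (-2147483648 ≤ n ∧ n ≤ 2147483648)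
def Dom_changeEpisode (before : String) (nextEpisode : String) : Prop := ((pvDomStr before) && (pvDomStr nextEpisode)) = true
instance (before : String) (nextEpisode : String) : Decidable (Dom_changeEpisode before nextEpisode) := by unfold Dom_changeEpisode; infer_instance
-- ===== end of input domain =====

-- B replaces A's per-digit list/assign/join rebuild (popping a reversed copy of nextEpisode)
-- by a single pass that consumes nextEpisode from the front; objective: idiomatic (one pass, one join).

-- ===== PORT A =====
-- one loop iteration of A: if before[i] is numeric, pop the last char of the reversed
-- queue and write it at position i (rebuilding the string); state = (before, reversed queue)
def pvStepA (st : List Char × List Char) (i : Int) : List Char × List Char :=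
  match PySem.List.pyGet? st.1 i with
  | some c =>
    if PySem.Chars.isdigit c then       -- str.isnumeric = str.isdigit on the ASCII domain
      match PySem.List.pop? st.2 (-1) with
      | some (d, rest) => (st.1.set i.toNat d, rest)   -- listed[i] = nextEpisode.pop(); i ≥ 0 here
      | none => st                                     -- IndexError in Python: outside Pre_
    else st
  | none => st

def changeEpisode (before : String) (nextEpisode : String) : String :=
  -- nextEpisode = list(nextEpisode)[::-1]
  let rev := (PySem.List.slice? nextEpisode.toList none none (-1)).getD []
  let st := (PySem.List.pyRange 0 (PySem.List.len before.toList) 1).foldl pvStepA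
      (before.toList, rev)
  String.ofList st.1

-- ===== PORT B =====
-- the generator expression: walk before once, taking the next queued char for each numeric char
def pvWalkB : List Char → List Char → List Char
  | [], _ => []
  | c :: t, q =>
    if PySem.Chars.isdigit c then       -- str.isnumeric = str.isdigit on the ASCII domain
      match q with
      | d :: q' => d :: pvWalkB t q'
      | [] => c :: pvWalkB t []         -- next(it) raises in Python: outside Pre_
    else c :: pvWalkB t q

def changeEpisode_alt (before : String) (nextEpisode : String) : String :=
  String.ofList (pvWalkB before.toList nextEpisode.toList)

-- ===== PRECONDITION & SPEC =====
-- A raises IndexError (pop from empty list) exactly when before has more numeric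
-- characters than nextEpisode has characters; those inputs are excluded.
def Pre_changeEpisode (before : String) (nextEpisode : String) : Prop :=
  before.toList.countP (fun c => PySem.Chars.isdigit c) ≤ nextEpisode.toList.length
instance (before : String) (nextEpisode : String) : Decidable (Pre_changeEpisode before nextEpisode) := by unfold Pre_changeEpisode; infer_instance

def pvWitness_changeEpisode : String × String := ("e01x2", "abc")

def Spec_changeEpisode (before : String) (nextEpisode : String) (out : String) : Prop := out = changeEpisode_alt before nextEpisode
instance (before : String) (nextEpisode : String) (out : String) : Decidable (Spec_changeEpisode before nextEpisode out) := by unfold Spec_changeEpisode; infer_instance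

-- ===== CLAIM (what is proved, stated in full; the proofs are below) =====
def Claim_equal_changeEpisode : Prop := ∀ (before : String) (nextEpisode : String), Dom_changeEpisode before nextEpisode → Pre_changeEpisode before nextEpisode → Spec_changeEpisode before nextEpisode (changeEpisode before nextEpisode)

-- ===== LEMMAS AND PROOFS =====

-- A's fold over the index range, started after a prefix it no longer touches, performs
-- exactly B's walk on the suffix; the reversed queue loses its last = q's first per digit.
theorem pvKey (post : List Char) : ∀ (pre q : List Char),
    post.countP (fun c => PySem.Chars.isdigit c) ≤ q.length →
    (PySem.List.pyRange (pre.length) ((pre.length : Int) + post.length) 1).foldl pvStepA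
      (pre ++ post, q.reverse)
    = (pre ++ pvWalkB post q,
       (q.drop (post.countP (fun c => PySem.Chars.isdigit c))).reverse) := by
  induction post with
  | nil =>
    intro pre q h
    simp [PySem.List.pyRange_one_eq_nil (le_refl _), pvWalkB]
  | cons c t ih =>
    intro pre q h
    rw [PySem.List.pyRange_one_cons (by push_cast [List.length_cons]; omega)]
    simp only [List.foldl_cons]
    have hget : pvStepA (pre ++ c :: t, q.reverse) (pre.length : Int)
        = if PySem.Chars.isdigit c then
            (match PySem.List.pop? q.reverse (-1) with
             | some (d, rest) => ((pre ++ c :: t).set pre.length d, rest)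
             | none => (pre ++ c :: t, q.reverse))
          else (pre ++ c :: t, q.reverse) := by
      simp [pvStepA]
    by_cases hc : PySem.Chars.isdigit c = true
    · -- a digit: q must be nonempty
      cases q with
      | nil => exfalso; rw [List.countP_cons] at h; simp [hc] at h
      | cons d q' =>
        have hpop : PySem.List.pop? (d :: q').reverse (-1) = some (d, q'.reverse) := by
          simp [PySem.List.pop?_last]
        rw [hget, if_pos hc]
        simp only [hpop]
        have hset : (pre ++ c :: t).set pre.length d = (pre ++ [d]) ++ t := by
          rw [List.set_append_right _ _ (le_refl _)]
          simp
        rw [hset]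
        have hcnt : t.countP (fun c => PySem.Chars.isdigit c) ≤ q'.length := by
          rw [List.countP_cons] at h
          simp [hc] at h
          omega
        rw [show ((pre.length : Int) + 1) = (((pre ++ [d]).length : Int)) by simp,
            show ((pre.length : Int) + ((c :: t).length : Int))
               = (((pre ++ [d]).length : Int) + t.length) by simp; ring]
        rw [ih (pre ++ [d]) q' hcnt]
        simp [pvWalkB, hc]
    · rw [hget, if_neg hc]
      have hcnt : t.countP (fun c => PySem.Chars.isdigit c) ≤ q.length := by
        rw [List.countP_cons] at h
        simpa [hc] using h
      rw [show ((pre.length : Int) + 1) = (((pre ++ [c]).length : Int)) by simp,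
          show ((pre.length : Int) + ((c :: t).length : Int))
             = (((pre ++ [c]).length : Int) + t.length) by simp; ring]
      have := ih (pre ++ [c]) q hcnt
      simp only [List.append_assoc, List.singleton_append] at this
      rw [this]
      simp [pvWalkB, hc]

-- ===== VERDICT (by name: the statement is the Claim_ definition above) =====
theorem changeEpisode_spec : Claim_equal_changeEpisode := by
  unfold Claim_equal_changeEpisode
  intro before nextEpisode _ hpre
  unfold Spec_changeEpisode changeEpisode changeEpisode_alt
  rw [PySem.List.slice?_none_none_neg_one]
  have := pvKey before.toList [] nextEpisode.toList hpre
  simp only [List.nil_append, List.length_nil, Nat.cast_zero, zero_add] at this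
  simp only [PySem.List.len_eq, Option.getD_some]
  rw [this]
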